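-- pv_equiv track=rewrite | github.com/i12know/vaysf | middleware/schedule_workbook.py | _two_game_pool_sizes
-- ===== SOURCE A (Python) =====
-- from typing import Optional, List, Dict, Any, Tuple
--
-- def _two_game_pool_sizes(n_teams: int) -> List[int]:
--     """Return deterministic pool sizes for the normalized 2-game/team policy."""
--     if n_teams < 2:
--         return []
--     if n_teams in (2, 3, 4, 5):
--         return [n_teams]
--
--     for n_fours in range(n_teams // 4, -1, -1):
--         remainder = n_teams - (4 * n_fours)
--         if remainder >= 0 and remainder % 3 == 0:
--             return ([4] * n_fours) + ([3] * (remainder // 3))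
--
--     raise ValueError(f"Unable to build normalized 2-game pools for n_teams={n_teams}")
-- ===== SOURCE B (Python) =====
-- def _two_game_pool_sizes(n_teams: int):
--     """Closed-form pool sizes: no search loop."""
--     if n_teams < 2:
--         return []
--     if n_teams in (2, 3, 4, 5):
--         return [n_teams]
--     m = n_teams // 4
--     k = m - ((m - n_teams) % 3)
--     return [4] * k + [3] * ((n_teams - 4 * k) // 3)
-- ===== Notes on version B (the rewrite author's own statement) =====
-- stated objective: simpler
-- what changed: Replaced the descending search loop over candidate counts of four-team pools by a closed-form modular-arithmetic computation of the maximal count.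
import Mathlib
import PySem

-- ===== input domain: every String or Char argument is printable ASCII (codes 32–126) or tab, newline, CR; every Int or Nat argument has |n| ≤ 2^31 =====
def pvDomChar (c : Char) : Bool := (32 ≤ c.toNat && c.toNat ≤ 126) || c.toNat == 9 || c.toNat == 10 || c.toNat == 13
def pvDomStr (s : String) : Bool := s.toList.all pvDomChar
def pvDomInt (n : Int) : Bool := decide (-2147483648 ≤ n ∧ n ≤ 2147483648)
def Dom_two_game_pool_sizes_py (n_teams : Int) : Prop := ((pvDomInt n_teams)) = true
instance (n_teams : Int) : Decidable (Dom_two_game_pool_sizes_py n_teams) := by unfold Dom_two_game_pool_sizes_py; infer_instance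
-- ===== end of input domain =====

-- B replaces A's descending search loop for the maximal number of 4-pools by a
-- closed-form modular-arithmetic computation (objective: simpler).

-- ===== PORT A =====
-- the 'for n_fours in range(n_teams // 4, -1, -1)' loop; fuel counts the remaining
-- range elements; fuel running out corresponds to the final 'raise ValueError',
-- which is unreachable for every n_teams that passes the earlier guards.
def pvLoopA (n : Int) : Nat → Int → List Int
  | 0, _ => []
  | fuel + 1, n_fours =>
    let remainder := n - 4 * n_fours
    if remainder ≥ 0 ∧ PySem.Int.mod remainder 3 = 0 then
      List.replicate n_fours.toNat 4 ++ List.replicate (PySem.Int.floordiv remainder 3).toNat 3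
    else
      pvLoopA n fuel (n_fours - 1)

def two_game_pool_sizes_py (n_teams : Int) : List Int :=
  if n_teams < 2 then []
  else if n_teams = 2 ∨ n_teams = 3 ∨ n_teams = 4 ∨ n_teams = 5 then [n_teams]
  else pvLoopA n_teams (PySem.Int.floordiv n_teams 4 + 1).toNat (PySem.Int.floordiv n_teams 4)

-- ===== PORT B =====
def two_game_pool_sizes_py_alt (n_teams : Int) : List Int :=
  if n_teams < 2 then []
  else if n_teams = 2 ∨ n_teams = 3 ∨ n_teams = 4 ∨ n_teams = 5 then [n_teams]
  else
    let m := PySem.Int.floordiv n_teams 4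
    let k := m - PySem.Int.mod (m - n_teams) 3
    List.replicate k.toNat 4 ++ List.replicate (PySem.Int.floordiv (n_teams - 4 * k) 3).toNat 3

-- ===== PRECONDITION & SPEC =====
def Spec_two_game_pool_sizes_py (n_teams : Int) (out : List Int) : Prop := out = two_game_pool_sizes_py_alt n_teams
instance (n_teams : Int) (out : List Int) : Decidable (Spec_two_game_pool_sizes_py n_teams out) := by unfold Spec_two_game_pool_sizes_py; infer_instance

-- ===== CLAIM (what is proved, stated in full; the proofs are below) =====
def Claim_equal_two_game_pool_sizes_py : Prop := ∀ (n_teams : Int), Dom_two_game_pool_sizes_py n_teams → Spec_two_game_pool_sizes_py n_teams (two_game_pool_sizes_py n_teams)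

-- ===== LEMMAS AND PROOFS =====

-- A's loop, started at any k between the closed-form answer k0 and m, returns the
-- pools for k0 (the largest count ≡ n (mod 3) that is ≤ m).
theorem pvLoopA_eq (n : Int) :
    ∀ (fuel : Nat) (k : Int), n / 4 - (n / 4 - n) % 3 ≤ k → k ≤ n / 4 →
      (k - (n / 4 - (n / 4 - n) % 3)).toNat < fuel →
      pvLoopA n fuel k =
        List.replicate (n / 4 - (n / 4 - n) % 3).toNat 4 ++
          List.replicate ((n - 4 * (n / 4 - (n / 4 - n) % 3)) / 3).toNat 3 := by
  intro fuel
  induction fuel with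
  | zero => intro k _ _ h; omega
  | succ fuel ih =>
    intro k hlo hhi hfuel
    rw [pvLoopA]
    have hmod : PySem.Int.mod (n - 4 * k) 3 = (n - 4 * k) % 3 :=
      PySem.Int.mod_eq_emod_of_pos (by omega)
    by_cases hk : k = n / 4 - (n / 4 - n) % 3
    · subst hk
      rw [hmod]
      simp only [ge_iff_le]
      rw [if_pos (by constructor <;> omega)]
      rw [PySem.Int.floordiv_eq_ediv_of_pos (b := 3) (by omega)]
    · have hne : ¬ (n - 4 * k ≥ 0 ∧ PySem.Int.mod (n - 4 * k) 3 = 0) := by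
        rw [hmod]
        intro ⟨_, hz⟩
        omega
      rw [if_neg hne]
      exact ih (k - 1) (by omega) (by omega) (by omega)

-- ===== VERDICT (by name: the statement is the Claim_ definition above) =====
theorem two_game_pool_sizes_py_spec : Claim_equal_two_game_pool_sizes_py := by
  intro n _
  unfold Spec_two_game_pool_sizes_py two_game_pool_sizes_py two_game_pool_sizes_py_alt
  by_cases h1 : n < 2
  · simp [h1]
  · by_cases h2 : n = 2 ∨ n = 3 ∨ n = 4 ∨ n = 5
    · simp [h1, h2]
    · rw [if_neg h1, if_neg h2, if_neg h1, if_neg h2]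
      have hn : 6 ≤ n := by omega
      have h4 : PySem.Int.floordiv n 4 = n / 4 := PySem.Int.floordiv_eq_ediv_of_pos (by omega)
      have h3 : PySem.Int.mod (n / 4 - n) 3 = (n / 4 - n) % 3 :=
        PySem.Int.mod_eq_emod_of_pos (by omega)
      simp only [h4, h3]
      rw [pvLoopA_eq n ((n / 4 + 1).toNat) (n / 4) (by omega) (by omega) (by omega)]
      rw [PySem.Int.floordiv_eq_ediv_of_pos (b := 3) (by omega)]
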